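-- pv_equiv track=rewrite | github.com/opensearch-project/opensearch-migrations | migrationConsole/lib/console_link/console_link/workflow/commands/autocomplete_k8s_labels.py | _get_key_completions
-- ===== SOURCE A (Python) =====
-- def _is_valid_combo(suggestion: str, valid_combos: list) -> bool:
--     """Check if suggestion labels are a subset of any valid combo."""
--     # Parse suggestion into set of (key, value) tuples
--     suggestion_set = set()
--     for part in suggestion.split(","):
--         if "=" in part:
--             k, v = part.split("=", 1)
--             suggestion_set.add((k, v))
--
--     # Check if this is a subset of any valid combo
--     return any(suggestion_set <= combo for combo in valid_combos)
--
-- def _get_key_completions(prefix, active_part, selected_keys, all_labels, valid_combos):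
--     """Generates initial key=value suggestions for keys not yet selected."""
--     results = []
--     for key, values in sorted(all_labels.items()):
--         if key.startswith(active_part) and key not in selected_keys:
--             for v in sorted(values):
--                 suggestion = f"{prefix}{key}={v}"
--                 if _is_valid_combo(suggestion, valid_combos):
--                     results.append(suggestion)
--     return results
-- ===== SOURCE B (Python) =====
-- def _get_key_completions(prefix, active_part, selected_keys, all_labels, valid_combos):
--     """Key=value suggestions; validity via a precomputed inverted index (pair -> combo ids)."""
--     # inverted index: (key, value) pair -> set of indices of combos containing it
--     index = {}
--     for i, combo in enumerate(valid_combos):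
--         for pair in combo:
--             index.setdefault(pair, set()).add(i)
--     universe = set(range(len(valid_combos)))
--
--     def hits(suggestion):
--         h = universe
--         for part in suggestion.split(","):
--             if "=" in part:
--                 k, v = part.split("=", 1)
--                 h = h & index.get((k, v), set())
--         return h
--
--     results = []
--     for key, values in sorted(all_labels.items()):
--         if key.startswith(active_part) and key not in selected_keys:
--             for v in sorted(values):
--                 suggestion = f"{prefix}{key}={v}"
--                 if hits(suggestion):
--                     results.append(suggestion)
--     return results
-- ===== Notes on version B (the rewrite author's own statement) =====
-- stated objective: alternative
-- what changed: B builds an inverted index (key,value)-pair -> set of combo indices once and decides each suggestion's validity by intersecting the posting sets of its parsed pairs, instead of A's per-suggestion subset scan over the whole combo list.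
import Mathlib
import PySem

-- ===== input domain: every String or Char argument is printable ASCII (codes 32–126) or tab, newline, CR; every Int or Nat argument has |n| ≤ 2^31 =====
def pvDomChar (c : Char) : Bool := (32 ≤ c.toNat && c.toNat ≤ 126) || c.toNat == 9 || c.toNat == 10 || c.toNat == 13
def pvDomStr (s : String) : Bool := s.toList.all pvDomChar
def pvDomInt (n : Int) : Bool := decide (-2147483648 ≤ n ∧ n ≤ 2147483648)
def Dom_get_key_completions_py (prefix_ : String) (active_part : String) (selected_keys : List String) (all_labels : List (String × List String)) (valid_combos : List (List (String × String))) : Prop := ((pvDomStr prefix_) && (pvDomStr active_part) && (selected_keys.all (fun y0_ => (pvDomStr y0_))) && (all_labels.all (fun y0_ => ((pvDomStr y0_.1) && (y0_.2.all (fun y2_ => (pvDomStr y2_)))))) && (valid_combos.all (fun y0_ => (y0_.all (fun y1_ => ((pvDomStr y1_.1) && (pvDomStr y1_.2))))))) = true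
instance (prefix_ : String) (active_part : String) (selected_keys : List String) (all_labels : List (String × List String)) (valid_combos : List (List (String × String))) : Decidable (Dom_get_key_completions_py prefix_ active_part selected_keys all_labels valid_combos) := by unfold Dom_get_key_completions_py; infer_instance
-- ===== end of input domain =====

-- B replaces A's per-suggestion scan over all combos with an inverted index (pair → set of combo ids)
-- built once, intersected per suggestion; return values proved equal on the whole domain.

-- ===== PORT A =====
-- helper _is_valid_combo: parse suggestion into a set of (key, value) pairs, then subset-check each combo
def pv_suggestion_set (suggestion : String) : PySem.Set (String × String) :=
  ((PySem.Str.split? suggestion ",").getD []).foldl (fun s part =>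
    if PySem.Str.isIn "=" part then
      match (PySem.Str.splitMax? part "=" 1).getD [] with
      | [k, v] => PySem.Set.add s (k, v)
      | _ => s          -- unreachable: '=' in part gives exactly two pieces
    else s) PySem.Set.empty

def pv_is_valid_combo (suggestion : String) (valid_combos : List (List (String × String))) : Bool :=
  valid_combos.any (fun combo => PySem.Set.issubset (pv_suggestion_set suggestion) combo)

def get_key_completions_py (prefix_ : String) (active_part : String) (selected_keys : List String) (all_labels : List (String × List String)) (valid_combos : List (List (String × String))) : List String :=
  (PySem.List.sorted2 all_labels (fun p => p.1) (fun p => p.2)).foldl (fun results kv =>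
    if PySem.Str.startswith kv.1 active_part && !(selected_keys.contains kv.1) then
      (PySem.List.sorted kv.2 (fun v => v)).foldl (fun results v =>
        let suggestion := prefix_ ++ kv.1 ++ "=" ++ v
        if pv_is_valid_combo suggestion valid_combos then results ++ [suggestion] else results) results
    else results) []

-- ===== PORT B =====
-- inverted index: (key, value) pair → set of indices of combos containing it
def pv_build_index (valid_combos : List (List (String × String))) : PySem.Dict (String × String) (PySem.Set Int) :=
  (PySem.List.enumerate valid_combos 0).foldl (fun d ic =>
    ic.2.foldl (fun d pair => d.modify pair PySem.Set.empty (fun s => PySem.Set.add s ic.1)) d) PySem.Dict.empty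

def pv_hits (index : PySem.Dict (String × String) (PySem.Set Int)) (univ : PySem.Set Int) (suggestion : String) : PySem.Set Int :=
  ((PySem.Str.split? suggestion ",").getD []).foldl (fun h part =>
    if PySem.Str.isIn "=" part then
      match (PySem.Str.splitMax? part "=" 1).getD [] with
      | [k, v] => PySem.Set.inter h (index.getD (k, v) PySem.Set.empty)
      | _ => h
    else h) univ

def get_key_completions_py_alt (prefix_ : String) (active_part : String) (selected_keys : List String) (all_labels : List (String × List String)) (valid_combos : List (List (String × String))) : List String :=
  let index := pv_build_index valid_combos
  let univ : PySem.Set Int := PySem.List.pyRange 0 (valid_combos.length : Int) 1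
  (PySem.List.sorted2 all_labels (fun p => p.1) (fun p => p.2)).foldl (fun results kv =>
    if PySem.Str.startswith kv.1 active_part && !(selected_keys.contains kv.1) then
      (PySem.List.sorted kv.2 (fun v => v)).foldl (fun results v =>
        let suggestion := prefix_ ++ kv.1 ++ "=" ++ v
        if (pv_hits index univ suggestion).isEmpty then results else results ++ [suggestion]) results
    else results) []

-- ===== PRECONDITION & SPEC =====
def Spec_get_key_completions_py (prefix_ : String) (active_part : String) (selected_keys : List String) (all_labels : List (String × List String)) (valid_combos : List (List (String × String))) (out : List String) : Prop := out = get_key_completions_py_alt prefix_ active_part selected_keys all_labels valid_combos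
instance (prefix_ : String) (active_part : String) (selected_keys : List String) (all_labels : List (String × List String)) (valid_combos : List (List (String × String))) (out : List String) : Decidable (Spec_get_key_completions_py prefix_ active_part selected_keys all_labels valid_combos out) := by unfold Spec_get_key_completions_py; infer_instance

-- ===== CLAIM (what is proved, stated in full; the proofs are below) =====
def Claim_equal_get_key_completions_py : Prop := ∀ (prefix_ : String) (active_part : String) (selected_keys : List String) (all_labels : List (String × List String)) (valid_combos : List (List (String × String))), Dom_get_key_completions_py prefix_ active_part selected_keys all_labels valid_combos → Spec_get_key_completions_py prefix_ active_part selected_keys all_labels valid_combos (get_key_completions_py prefix_ active_part selected_keys all_labels valid_combos)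

-- ===== LEMMAS AND PROOFS =====

-- the (key, value) pair a comma-part contributes, if any (proof-side view of the shared parse step)
def pv_partPair (part : String) : Option (String × String) :=
  if PySem.Str.isIn "=" part then
    match (PySem.Str.splitMax? part "=" 1).getD [] with
    | [k, v] => some (k, v)
    | _ => none
  else none

theorem pv_mem_set_fold (parts : List String) (acc : PySem.Set (String × String)) (p : String × String) :
    p ∈ parts.foldl (fun s part =>
      if PySem.Str.isIn "=" part then
        match (PySem.Str.splitMax? part "=" 1).getD [] with
        | [k, v] => PySem.Set.add s (k, v)
        | _ => s
      else s) acc ↔ p ∈ acc ∨ ∃ part ∈ parts, pv_partPair part = some p := by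
  induction parts generalizing acc with
  | nil => simp
  | cons part rest ih =>
    simp only [List.foldl_cons]
    rw [ih]
    by_cases hin : PySem.Str.isIn "=" part
    all_goals simp only [Bool.not_eq_true] at hin
    all_goals have hin' : PySem.Chars.isIn ['='] part.toList = _ := hin
    · rcases hl : (PySem.Str.splitMax? part "=" 1).getD [] with _ | ⟨k, _ | ⟨v, _ | _⟩⟩ <;>
        simp [pv_partPair, hin', hl, PySem.Set.mem_add] <;> tauto
    · simp [pv_partPair, hin']

theorem pv_mem_hits_fold (idx : PySem.Dict (String × String) (PySem.Set Int))
    (parts : List String) (h : PySem.Set Int) (j : Int) :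
    j ∈ parts.foldl (fun h part =>
      if PySem.Str.isIn "=" part then
        match (PySem.Str.splitMax? part "=" 1).getD [] with
        | [k, v] => PySem.Set.inter h (idx.getD (k, v) PySem.Set.empty)
        | _ => h
      else h) h ↔ j ∈ h ∧ ∀ part ∈ parts, ∀ p, pv_partPair part = some p → j ∈ idx.getD p PySem.Set.empty := by
  induction parts generalizing h with
  | nil => simp
  | cons part rest ih =>
    simp only [List.foldl_cons]
    rw [ih]
    by_cases hin : PySem.Str.isIn "=" part
    all_goals simp only [Bool.not_eq_true] at hin
    all_goals have hin' : PySem.Chars.isIn ['='] part.toList = _ := hin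
    · rcases hl : (PySem.Str.splitMax? part "=" 1).getD [] with _ | ⟨k, _ | ⟨v, _ | _⟩⟩ <;>
        simp [pv_partPair, hin', hl, PySem.Set.mem_inter] <;> tauto
    · simp [pv_partPair, hin']

theorem pv_getD_inner_fold (c : List (String × String)) (d : PySem.Dict (String × String) (PySem.Set Int))
    (i : Int) (p : String × String) :
    (c.foldl (fun d pair => d.modify pair PySem.Set.empty (fun s => PySem.Set.add s i)) d).getD p PySem.Set.empty
      = if p ∈ c then PySem.Set.add (d.getD p PySem.Set.empty) i else d.getD p PySem.Set.empty := by
  induction c generalizing d with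
  | nil => simp
  | cons q rest ih =>
    simp only [List.foldl_cons]
    rw [ih, PySem.Dict.getD_modify]
    by_cases hpq : p = q
    · subst hpq
      rw [if_pos rfl, if_pos (List.mem_cons_self)]
      split_ifs with hmem
      · exact PySem.Set.add_of_mem (by rw [PySem.Set.mem_add]; exact Or.inr rfl)
      · rfl
    · rw [if_neg hpq]
      by_cases hr : p ∈ rest
      · rw [if_pos hr, if_pos (List.mem_cons_of_mem _ hr)]
      · rw [if_neg hr, if_neg (by simp [List.mem_cons, hpq, hr])]

theorem pv_mem_outer_fold (l : List (Int × List (String × String))) (d : PySem.Dict (String × String) (PySem.Set Int))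
    (p : String × String) (j : Int) :
    j ∈ (l.foldl (fun d ic =>
        ic.2.foldl (fun d pair => d.modify pair PySem.Set.empty (fun s => PySem.Set.add s ic.1)) d) d).getD p PySem.Set.empty
      ↔ j ∈ d.getD p PySem.Set.empty ∨ ∃ ic ∈ l, ic.1 = j ∧ p ∈ ic.2 := by
  induction l generalizing d with
  | nil => simp
  | cons ic rest ih =>
    simp only [List.foldl_cons]
    rw [ih, pv_getD_inner_fold]
    by_cases hp : p ∈ ic.2
    · rw [if_pos hp]
      rw [PySem.Set.mem_add]
      constructor
      · rintro ((h | h) | ⟨ic', h1, h2, h3⟩)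
        · exact Or.inl h
        · exact Or.inr ⟨ic, List.mem_cons_self, h.symm, hp⟩
        · exact Or.inr ⟨ic', List.mem_cons_of_mem _ h1, h2, h3⟩
      · rintro (h | ⟨ic', h1, h2, h3⟩)
        · exact Or.inl (Or.inl h)
        · rcases List.mem_cons.mp h1 with rfl | h1
          · exact Or.inl (Or.inr h2.symm)
          · exact Or.inr ⟨ic', h1, h2, h3⟩
    · rw [if_neg hp]
      constructor
      · rintro (h | ⟨ic', h1, h2, h3⟩)
        · exact Or.inl h
        · exact Or.inr ⟨ic', List.mem_cons_of_mem _ h1, h2, h3⟩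
      · rintro (h | ⟨ic', h1, h2, h3⟩)
        · exact Or.inl h
        · rcases List.mem_cons.mp h1 with rfl | h1
          · exact absurd h3 hp
          · exact Or.inr ⟨ic', h1, h2, h3⟩

theorem pv_mem_index (valid_combos : List (List (String × String))) (p : String × String) (j : Int) :
    j ∈ (pv_build_index valid_combos).getD p PySem.Set.empty ↔
      ∃ k : Nat, ∃ _ : k < valid_combos.length, j = (k : Int) ∧ p ∈ valid_combos[k] := by
  unfold pv_build_index
  rw [pv_mem_outer_fold]
  simp only [PySem.Dict.getD_empty]
  constructor
  · rintro (h | ⟨ic, hic, h1, h2⟩)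
    · simp [PySem.Set.empty] at h
    · rw [PySem.List.mem_enumerate_iff] at hic
      obtain ⟨k, hk, hic⟩ := hic
      subst hic
      exact ⟨k, hk, by simpa using h1.symm, h2⟩
  · rintro ⟨k, hk, h1, h2⟩
    refine Or.inr ⟨((k : Int), valid_combos[k]), ?_, by simpa using h1.symm, h2⟩
    rw [PySem.List.mem_enumerate_iff]
    exact ⟨k, hk, by simp⟩

theorem pv_cond (s : String) (valid_combos : List (List (String × String))) :
    (pv_hits (pv_build_index valid_combos) (PySem.List.pyRange 0 (valid_combos.length : Int) 1) s).isEmpty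
      = ! pv_is_valid_combo s valid_combos := by
  have key : (∃ j, j ∈ pv_hits (pv_build_index valid_combos) (PySem.List.pyRange 0 (valid_combos.length : Int) 1) s)
      ↔ pv_is_valid_combo s valid_combos = true := by
    unfold pv_hits pv_is_valid_combo
    constructor
    · rintro ⟨j, hj⟩
      rw [pv_mem_hits_fold] at hj
      obtain ⟨hju, hjp⟩ := hj
      rw [PySem.List.mem_pyRange_one] at hju
      rw [List.any_eq_true]
      have hjn : j.toNat < valid_combos.length := by omega
      refine ⟨valid_combos[j.toNat], List.getElem_mem _, ?_⟩
      rw [PySem.Set.issubset_iff]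
      intro p hp
      simp only [pv_suggestion_set] at hp
      rw [pv_mem_set_fold] at hp
      rcases hp with hp | ⟨part, hpart, hpp⟩
      · simp [PySem.Set.empty] at hp
      · have hidx := hjp part hpart p hpp
        rw [pv_mem_index] at hidx
        obtain ⟨k, hk, hjk, hpk⟩ := hidx
        have hkk : j.toNat = k := by omega
        subst hkk
        exact hpk
    · intro hv
      rw [List.any_eq_true] at hv
      obtain ⟨combo, hc, hsub⟩ := hv
      rw [PySem.Set.issubset_iff] at hsub
      obtain ⟨k, hk, rfl⟩ := List.mem_iff_getElem.mp hc
      refine ⟨(k : Int), ?_⟩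
      rw [pv_mem_hits_fold]
      refine ⟨by rw [PySem.List.mem_pyRange_one]; omega, ?_⟩
      intro part hpart p hpp
      have hps : p ∈ pv_suggestion_set s := by
        simp only [pv_suggestion_set]
        rw [pv_mem_set_fold]
        exact Or.inr ⟨part, hpart, hpp⟩
      rw [pv_mem_index]
      exact ⟨k, hk, rfl, hsub p hps⟩
  cases hv : pv_is_valid_combo s valid_combos
  · simp only [Bool.not_false]
    rw [List.isEmpty_iff, List.eq_nil_iff_forall_not_mem]
    intro j hj
    exact absurd (key.mp ⟨j, hj⟩) (by simp [hv])
  · simp only [Bool.not_true]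
    obtain ⟨j, hj⟩ := key.mpr hv
    cases hE : (pv_hits (pv_build_index valid_combos) (PySem.List.pyRange 0 (valid_combos.length : Int) 1) s).isEmpty
    · rfl
    · rw [List.isEmpty_iff] at hE
      rw [hE] at hj
      simp at hj

-- ===== VERDICT (by name: the statement is the Claim_ definition above) =====
theorem get_key_completions_py_spec : Claim_equal_get_key_completions_py := by
  intro prefix_ active_part selected_keys all_labels valid_combos _
  unfold Spec_get_key_completions_py get_key_completions_py get_key_completions_py_alt
  have hg : ∀ key : String,
      (fun (results : List String) (v : String) =>
        let suggestion := prefix_ ++ key ++ "=" ++ v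
        if (pv_hits (pv_build_index valid_combos) (PySem.List.pyRange 0 (valid_combos.length : Int) 1) suggestion).isEmpty
        then results else results ++ [suggestion])
      = (fun (results : List String) (v : String) =>
        let suggestion := prefix_ ++ key ++ "=" ++ v
        if pv_is_valid_combo suggestion valid_combos then results ++ [suggestion] else results) := by
    intro key
    funext results v
    simp only [pv_cond]
    cases pv_is_valid_combo (prefix_ ++ key ++ "=" ++ v) valid_combos <;> simp
  show _ = List.foldl _ [] _
  congr 1
  funext results kv
  rw [hg kv.1]
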